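-- pv_equiv track=rewrite | github.com/JoshLi15/thesis-code | data/voxceleb/2_merge_prof_wide.py | apply_actor_subclass
-- ===== SOURCE A (Python) =====
-- subclass_priority = [
--     ("actor", "comedian"),
--     ("television actor", "comedian"),
--     ("film actor", "comedian"),
--     ("actor", "singer"),
--     ("television actor", "singer"),
--     ("film actor", "singer"),
--     ("actor", "writer"),
--     ("television actor", "writer"),
--     ("film actor", "writer"),
--     ("actor", "director"),
--     ("television actor", "director"),
--     ("film actor", "director"),
--     ("actor", "screenwriter"),
--     ("television actor", "screenwriter"),
--     ("film actor", "screenwriter"),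
--     ("actor", "producer"),
--     ("television actor", "producer"),
--     ("film actor", "producer"),
--     ("actor", "film producer"),
--     ("television actor", "film producer"),
--     ("film actor", "film producer"),
--     ("actor", "television producer"),
--     ("television actor", "television producer"),
--     ("film actor", "television producer"),
--     ("actor", "model"),
--     ("television actor", "model"),
--     ("film actor", "model"),
-- ]
--
-- subclass_labels = {
--     ("actor", "comedian"): "actor-comedian",
--     ("television actor", "comedian"): "actor-comedian",
--     ("film actor", "comedian"): "actor-comedian",
--     ("actor", "singer"): "actor-singer",
--     ("television actor", "singer"): "actor-singer",
--     ("film actor", "singer"): "actor-singer",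
--     ("actor", "writer"): "actor-writer",
--     ("television actor", "writer"): "actor-writer",
--     ("film actor", "writer"): "actor-writer",
--     ("actor", "director"): "actor-director",
--     ("television actor", "director"): "actor-director",
--     ("film actor", "director"): "actor-director",
--     ("actor", "screenwriter"): "actor-screenwriter",
--     ("television actor", "screenwriter"): "actor-screenwriter",
--     ("film actor", "screenwriter"): "actor-screenwriter",
--     ("actor", "producer"): "actor-producer",
--     ("television actor", "producer"): "actor-producer",
--     ("film actor", "producer"): "actor-producer",
--     ("actor", "film producer"): "actor-producer",
--     ("television actor", "film producer"): "actor-producer",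
--     ("film actor", "film producer"): "actor-producer",
--     ("actor", "television producer"): "actor-producer",
--     ("television actor", "television producer"): "actor-producer",
--     ("film actor", "television producer"): "actor-producer",
--     ("actor", "model"): "actor-model",
--     ("television actor", "model"): "actor-model",
--     ("film actor", "model"): "actor-model",
-- }
--
-- def apply_actor_subclass(prof_string):
--     professions = [p.strip() for p in prof_string.split(",")]
--     prof_set = set(p.lower() for p in professions)
--     for combo in subclass_priority:
--         if all(term in prof_set for term in combo):
--             new_label = subclass_labels[combo]
--             if new_label not in professions:
--                 return new_label
--     # only return first profession if no subclass matches
--     first_prof = professions[0].lower()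
--     return first_prof
-- ===== SOURCE B (Python) =====
-- # Simpler: one ordered (secondary, label) table instead of 27 triplicated (actor-type, secondary) entries.
-- actor_types = ("actor", "television actor", "film actor")
--
-- subclass_rules = [
--     ("comedian", "actor-comedian"),
--     ("singer", "actor-singer"),
--     ("writer", "actor-writer"),
--     ("director", "actor-director"),
--     ("screenwriter", "actor-screenwriter"),
--     ("producer", "actor-producer"),
--     ("film producer", "actor-producer"),
--     ("television producer", "actor-producer"),
--     ("model", "actor-model"),
-- ]
--
-- def apply_actor_subclass(prof_string):
--     professions = [p.strip() for p in prof_string.split(",")]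
--     prof_set = {p.lower() for p in professions}
--     if any(a in prof_set for a in actor_types):
--         for secondary, label in subclass_rules:
--             if secondary in prof_set and label not in professions:
--                 return label
--     return professions[0].lower()
-- ===== Notes on version B (the rewrite author's own statement) =====
-- stated objective: simpler
-- what changed: B factors the actor-type check out of the loop (computed once via any()) and collapses the 27 triplicated priority entries plus the 27-entry label dict into a single ordered list of 9 (secondary, label) rules, returning the first rule whose secondary is in the profession set and whose label is not already a profession.
import Mathlib
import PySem

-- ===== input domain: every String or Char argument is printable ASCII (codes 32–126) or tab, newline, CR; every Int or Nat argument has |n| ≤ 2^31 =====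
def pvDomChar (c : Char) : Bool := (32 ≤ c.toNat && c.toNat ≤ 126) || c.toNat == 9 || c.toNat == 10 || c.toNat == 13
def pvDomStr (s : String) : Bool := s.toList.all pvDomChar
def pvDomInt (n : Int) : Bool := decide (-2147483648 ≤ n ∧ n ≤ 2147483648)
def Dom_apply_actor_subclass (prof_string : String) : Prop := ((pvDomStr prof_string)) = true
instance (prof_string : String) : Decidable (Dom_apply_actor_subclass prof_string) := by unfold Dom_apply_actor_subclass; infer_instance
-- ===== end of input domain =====

-- B factors the has-actor test out of the loop and collapses A's 27 triplicated
-- priority entries + 27-entry label dict into one ordered 9-entry (secondary, label)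
-- table; objective: simpler. Equivalence proved for all inputs (both are total).


-- ===== PORT A =====
def subclass_priority : List (String × String) :=
  [("actor", "comedian"), ("television actor", "comedian"), ("film actor", "comedian"),
   ("actor", "singer"), ("television actor", "singer"), ("film actor", "singer"),
   ("actor", "writer"), ("television actor", "writer"), ("film actor", "writer"),
   ("actor", "director"), ("television actor", "director"), ("film actor", "director"),
   ("actor", "screenwriter"), ("television actor", "screenwriter"), ("film actor", "screenwriter"),
   ("actor", "producer"), ("television actor", "producer"), ("film actor", "producer"),
   ("actor", "film producer"), ("television actor", "film producer"), ("film actor", "film producer"),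
   ("actor", "television producer"), ("television actor", "television producer"), ("film actor", "television producer"),
   ("actor", "model"), ("television actor", "model"), ("film actor", "model")]

def subclass_labels : PySem.Dict (String × String) String :=
  PySem.Dict.ofList
  [(("actor", "comedian"), "actor-comedian"), (("television actor", "comedian"), "actor-comedian"), (("film actor", "comedian"), "actor-comedian"),
   (("actor", "singer"), "actor-singer"), (("television actor", "singer"), "actor-singer"), (("film actor", "singer"), "actor-singer"),
   (("actor", "writer"), "actor-writer"), (("television actor", "writer"), "actor-writer"), (("film actor", "writer"), "actor-writer"),
   (("actor", "director"), "actor-director"), (("television actor", "director"), "actor-director"), (("film actor", "director"), "actor-director"),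
   (("actor", "screenwriter"), "actor-screenwriter"), (("television actor", "screenwriter"), "actor-screenwriter"), (("film actor", "screenwriter"), "actor-screenwriter"),
   (("actor", "producer"), "actor-producer"), (("television actor", "producer"), "actor-producer"), (("film actor", "producer"), "actor-producer"),
   (("actor", "film producer"), "actor-producer"), (("television actor", "film producer"), "actor-producer"), (("film actor", "film producer"), "actor-producer"),
   (("actor", "television producer"), "actor-producer"), (("television actor", "television producer"), "actor-producer"), (("film actor", "television producer"), "actor-producer"),
   (("actor", "model"), "actor-model"), (("television actor", "model"), "actor-model"), (("film actor", "model"), "actor-model")]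

-- A's for-loop over subclass_priority; the dict lookup subclass_labels[combo] is total
-- here (every combo of subclass_priority is a key), so getD's default is unreachable.
def pvLoopA (profSet : PySem.Set String) (professions : List String) :
    List (String × String) → Option String
  | [] => none
  | combo :: rest =>
    if PySem.Set.contains profSet combo.1 && PySem.Set.contains profSet combo.2 then
      let new_label := PySem.Dict.getD subclass_labels combo ""
      if !(professions.contains new_label) then some new_label
      else pvLoopA profSet professions rest
    else pvLoopA profSet professions rest

def apply_actor_subclass (prof_string : String) : String :=
  let professions := ((PySem.Str.split? prof_string ",").getD []).map PySem.Str.strip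
  let prof_set : PySem.Set String := PySem.Set.ofList (professions.map PySem.Str.lower)
  match pvLoopA prof_set professions subclass_priority with
  | some l => l
  | none =>
    -- professions[0]: split always returns a nonempty list, so the "" default is unreachable
    PySem.Str.lower ((PySem.List.pyGet? professions 0).getD "")

-- ===== PORT B =====
def actor_types : List String := ["actor", "television actor", "film actor"]

def subclass_rules : List (String × String) :=
  [("comedian", "actor-comedian"), ("singer", "actor-singer"), ("writer", "actor-writer"),
   ("director", "actor-director"), ("screenwriter", "actor-screenwriter"),
   ("producer", "actor-producer"), ("film producer", "actor-producer"),
   ("television producer", "actor-producer"), ("model", "actor-model")]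

def pvLoopB (profSet : PySem.Set String) (professions : List String) :
    List (String × String) → Option String
  | [] => none
  | (secondary, label) :: rest =>
    if PySem.Set.contains profSet secondary && !(professions.contains label) then some label
    else pvLoopB profSet professions rest

def apply_actor_subclass_alt (prof_string : String) : String :=
  let professions := ((PySem.Str.split? prof_string ",").getD []).map PySem.Str.strip
  let prof_set : PySem.Set String := PySem.Set.ofList (professions.map PySem.Str.lower)
  let fallback := PySem.Str.lower ((PySem.List.pyGet? professions 0).getD "")
  if actor_types.any (fun a => PySem.Set.contains prof_set a) then
    match pvLoopB prof_set professions subclass_rules with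
    | some l => l
    | none => fallback
  else fallback

-- ===== PRECONDITION & SPEC =====
def Spec_apply_actor_subclass (prof_string : String) (out : String) : Prop := out = apply_actor_subclass_alt prof_string
instance (prof_string : String) (out : String) : Decidable (Spec_apply_actor_subclass prof_string out) := by unfold Spec_apply_actor_subclass; infer_instance

-- ===== CLAIM (what is proved, stated in full; the proofs are below) =====
def Claim_equal_apply_actor_subclass : Prop := ∀ (prof_string : String), Dom_apply_actor_subclass prof_string → Spec_apply_actor_subclass prof_string (apply_actor_subclass prof_string)

-- ===== LEMMAS AND PROOFS =====

-- One triplicated group of A's priority list behaves like a single B rule,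
-- gated by "some actor type is in the set".
theorem pvGroupA (S P : List String) (sec l : String) (rest : List (String × String))
    (h1 : PySem.Dict.getD subclass_labels ("actor", sec) "" = l)
    (h2 : PySem.Dict.getD subclass_labels ("television actor", sec) "" = l)
    (h3 : PySem.Dict.getD subclass_labels ("film actor", sec) "" = l) :
    pvLoopA S P (("actor", sec) :: ("television actor", sec) :: ("film actor", sec) :: rest)
      = if (PySem.Set.contains S "actor" || PySem.Set.contains S "television actor"
              || PySem.Set.contains S "film actor")
            && PySem.Set.contains S sec && !(P.contains l)
        then some l else pvLoopA S P rest := by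
  simp only [pvLoopA, h1, h2, h3]
  by_cases ha : "actor" ∈ S <;>
    by_cases ht : "television actor" ∈ S <;>
      by_cases hf : "film actor" ∈ S <;>
        by_cases hs : sec ∈ S <;>
          by_cases hp : l ∈ P <;>
            simp [ha, ht, hf, hs, hp]

theorem pvLoops_eq (S P : List String) :
    pvLoopA S P subclass_priority
      = if PySem.Set.contains S "actor" || PySem.Set.contains S "television actor"
            || PySem.Set.contains S "film actor"
        then pvLoopB S P subclass_rules else none := by
  show pvLoopA S P (("actor", "comedian") :: _ :: _ :: _) = _
  rw [pvGroupA S P "comedian" "actor-comedian" _ rfl rfl rfl,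
      pvGroupA S P "singer" "actor-singer" _ rfl rfl rfl,
      pvGroupA S P "writer" "actor-writer" _ rfl rfl rfl,
      pvGroupA S P "director" "actor-director" _ rfl rfl rfl,
      pvGroupA S P "screenwriter" "actor-screenwriter" _ rfl rfl rfl,
      pvGroupA S P "producer" "actor-producer" _ rfl rfl rfl,
      pvGroupA S P "film producer" "actor-producer" _ rfl rfl rfl,
      pvGroupA S P "television producer" "actor-producer" _ rfl rfl rfl,
      pvGroupA S P "model" "actor-model" _ rfl rfl rfl]
  by_cases ha : "actor" ∈ S <;>
    by_cases ht : "television actor" ∈ S <;>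
      by_cases hf : "film actor" ∈ S <;>
        simp [ha, ht, hf, pvLoopB, subclass_rules, pvLoopA]

-- ===== VERDICT (by name: the statement is the Claim_ definition above) =====
theorem apply_actor_subclass_spec : Claim_equal_apply_actor_subclass := by
  intro s _
  unfold Spec_apply_actor_subclass apply_actor_subclass apply_actor_subclass_alt
  simp only [actor_types, List.any_cons, List.any_nil, Bool.or_false]
  rw [pvLoops_eq, Bool.or_assoc]
  split_ifs with h
  · rfl
  · rfl
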